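-- pv_equiv track=rewrite | github.com/KiloMusician/ChatDev2 | ecosystem/Dev-Mentor/app/game_engine/filesystem.py | _perms_str
-- ===== SOURCE A (Python) =====
-- def _perms_str(perms: str) -> str:
--     """Convert numeric perms like 755 to rwxr-xr-x."""
--     try:
--         n = int(perms[-3:])
--         chars = ""
--         for shift in (6, 3, 0):
--             v = (n >> shift) & 7
--             chars += ("r" if v & 4 else "-") + ("w" if v & 2 else "-") + ("x" if v & 1 else "-")
--         return chars
--     except Exception:
--         return "rw-r--r--"
-- ===== SOURCE B (Python) =====
-- _TRIPLES = ("---", "--x", "-w-", "-wx", "r--", "r-x", "rw-", "rwx")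
--
--
-- def _perms_str(perms: str) -> str:
--     """Convert numeric perms like 755 to rwxr-xr-x."""
--     try:
--         n = int(perms[-3:])
--         out = ""
--         for _ in range(3):
--             out = _TRIPLES[n & 7] + out
--             n >>= 3
--         return out
--     except Exception:
--         return "rw-r--r--"
-- ===== Notes on version B (the rewrite author's own statement) =====
-- stated objective: alternative
-- what changed: B replaces A's per-bit tests (three (n>>shift)&7 extractions each turned into three conditional characters) by an 8-entry precomputed lookup table of rwx triples, indexed by the LOW octal digit n&7, building the result back-to-front while shifting n right by 3 each step; at run time no bit is tested and the output is assembled from the last group to the first.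
import Mathlib
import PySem

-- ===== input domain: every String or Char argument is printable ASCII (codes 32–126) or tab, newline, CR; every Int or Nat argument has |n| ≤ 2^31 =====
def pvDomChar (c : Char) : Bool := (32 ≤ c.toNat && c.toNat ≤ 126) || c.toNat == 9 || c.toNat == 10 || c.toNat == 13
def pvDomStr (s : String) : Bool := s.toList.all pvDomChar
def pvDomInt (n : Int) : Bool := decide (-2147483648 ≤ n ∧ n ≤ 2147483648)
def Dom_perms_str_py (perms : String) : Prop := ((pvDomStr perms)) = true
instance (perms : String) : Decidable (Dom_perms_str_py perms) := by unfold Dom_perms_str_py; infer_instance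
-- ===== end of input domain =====

-- B replaces A's per-bit tests by an 8-entry precomputed table of rwx triples indexed by the
-- low octal digit n & 7, assembling the result back-to-front while shifting n right by 3
-- (objective: alternative decomposition; same cost).

-- ===== PORT A =====
-- literal port of A: n = int(perms[-3:]); on ValueError (broad except) return "rw-r--r--";
-- else fold over shifts (6,3,0) appending the three group characters.
def perms_str_py (perms : String) : String :=
  match PySem.Int.ofStr? (PySem.Str.slice perms (some (-3)) none) with
  | none => "rw-r--r--"
  | some n =>
    String.ofList (([(6:Nat), 3, 0]).foldl (fun (acc : List Char) (shift : Nat) =>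
      let v := PySem.Int.band (n >>> shift) 7
      acc ++ [(if PySem.Int.band v 4 ≠ 0 then 'r' else '-'),
              (if PySem.Int.band v 2 ≠ 0 then 'w' else '-'),
              (if PySem.Int.band v 1 ≠ 0 then 'x' else '-')]) ([] : List Char))

-- ===== PORT B =====
-- the module-level tuple _TRIPLES of Source B
def pvTriples : List (List Char) :=
  [['-','-','-'], ['-','-','x'], ['-','w','-'], ['-','w','x'],
   ['r','-','-'], ['r','-','x'], ['r','w','-'], ['r','w','x']]

-- literal port of B: same parse/except; then for _ in range(3): out = _TRIPLES[n & 7] + out; n >>= 3.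
-- _TRIPLES[n & 7]: the index n & 7 is always in 0..7, so getD with .toNat is exact here.
def perms_str_py_alt (perms : String) : String :=
  match PySem.Int.ofStr? (PySem.Str.slice perms (some (-3)) none) with
  | none => "rw-r--r--"
  | some n =>
    String.ofList (((List.range 3).foldl (fun (st : Int × List Char) _ =>
      (st.1 >>> (3 : Nat), pvTriples.getD (PySem.Int.band st.1 7).toNat [] ++ st.2))
      (n, ([] : List Char))).2)

-- ===== PRECONDITION & SPEC =====
def Spec_perms_str_py (perms : String) (out : String) : Prop := out = perms_str_py_alt perms
instance (perms : String) (out : String) : Decidable (Spec_perms_str_py perms out) := by unfold Spec_perms_str_py; infer_instance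

-- ===== CLAIM (what is proved, stated in full; the proofs are below) =====
def Claim_equal_perms_str_py : Prop := ∀ (perms : String), Dom_perms_str_py perms → Spec_perms_str_py perms (perms_str_py perms)

-- ===== LEMMAS AND PROOFS =====

-- band with the low-three-bit mask is mod 8 (Python semantics, any sign)
lemma mask7 (a : Int) : PySem.Int.band a 7 = a % 8 := by
  unfold PySem.Int.band
  split_ifs with ha hb hb
  · have : a.toNat &&& (7:Int).toNat = a.toNat % 8 := by
      simpa using Nat.and_two_pow_sub_one_eq_mod a.toNat 3
    rw [this]; omega
  · omega
  · have : (7:Int).toNat &&& (-a - 1).toNat = (-a - 1).toNat % 8 := by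
      rw [Nat.and_comm]; simpa using Nat.and_two_pow_sub_one_eq_mod (-a - 1).toNat 3
    rw [this]; omega
  · omega

-- the table entry at the low octal digit of x equals A's three conditional characters for that digit
lemma grp (x : Int) :
    pvTriples.getD (PySem.Int.band x 7).toNat [] =
      [(if PySem.Int.band (PySem.Int.band x 7) 4 ≠ 0 then 'r' else '-'),
       (if PySem.Int.band (PySem.Int.band x 7) 2 ≠ 0 then 'w' else '-'),
       (if PySem.Int.band (PySem.Int.band x 7) 1 ≠ 0 then 'x' else '-')] := by
  rw [mask7]
  have h8 : x % 8 = 0 ∨ x % 8 = 1 ∨ x % 8 = 2 ∨ x % 8 = 3 ∨ x % 8 = 4 ∨ x % 8 = 5 ∨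
      x % 8 = 6 ∨ x % 8 = 7 := by omega
  rcases h8 with h|h|h|h|h|h|h|h <;> rw [h] <;> decide

-- two right-shifts by 3 are one by 6; a shift by 0 is the identity (Int, Nat shift amounts)
lemma shift_shift (m : Int) : m >>> (3 : Nat) >>> (3 : Nat) = m >>> (6 : Nat) := by
  simp only [Int.shiftRight_eq_div_pow]
  push_cast
  rw [Int.ediv_ediv_of_nonneg (by norm_num : (0:Int) ≤ 8)]
  norm_num

lemma shift_zero (m : Int) : m >>> (0 : Nat) = m := by
  simp [Int.shiftRight_eq_div_pow]

-- ===== VERDICT (by name: the statement is the Claim_ definition above) =====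
theorem perms_str_py_spec : Claim_equal_perms_str_py := by
  intro perms _
  unfold Spec_perms_str_py perms_str_py perms_str_py_alt
  cases h : PySem.Int.ofStr? (PySem.Str.slice perms (some (-3)) none) with
  | none => rfl
  | some n =>
    have hr : List.range 3 = [0, 1, 2] := by decide
    refine congrArg String.ofList ?_
    simp only [hr, List.foldl]
    rw [grp, grp, grp, shift_shift, shift_zero]
    simp
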